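-- pv_equiv track=rewrite | github.com/smohapatra1/scripting | python/practice/start_again/2024/06112024/coin_on_the_table.py | bfs
-- ===== SOURCE A (Python) =====
-- from collections import deque
--
-- def bfs(board, limit, end, min_distance):
--     rows, cols = len(board), len(board[0])
--     queue = deque([((0, 0), 0, 0)])
--     moves = {'U': (-1, 0), 'L': (0, -1), 'D': (1, 0), 'R': (0, 1)}
--     seen = {(0, 0): {0: 0}}
--     least_changes = min_distance
--     while queue:
--         (r, c), changes, steps = queue.popleft()
--         if steps > limit:
--             continue
--         if (r, c) == end:
--             least_changes = min(changes, least_changes)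
--         for move, (y, x) in moves.items():
--             rr, cc = r + y, c + x
--             if 0 <= rr < rows and 0 <= cc < cols:
--                 new_changes = changes + (1 if board[r][c] != move else 0)
--                 new_state = ((rr, cc), new_changes, steps + 1)
--                 if (rr, cc) in seen:
--                     if new_changes in seen[(rr, cc)]:
--                         if steps + 1 < seen[(rr, cc)][new_changes]:
--                             seen[(rr, cc)][new_changes] = steps + 1
--                             queue.append(new_state)
--                     else:
--                         seen[(rr, cc)][new_changes] = steps + 1
--                         queue.append(new_state)
--                 else:
--                     seen[(rr, cc)] = {}
--                     seen[(rr, cc)][new_changes] = steps + 1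
--                     queue.append(new_state)
--     return least_changes
-- ===== SOURCE B (Python) =====
-- def bfs(board, limit, end, min_distance):
--     # Step-indexed dynamic programming instead of a BFS over (cell, changes)
--     # states: dp maps each cell to the minimum number of direction changes over
--     # all walks of exactly s steps from (0, 0) to it (one int per cell), relaxed
--     # level by level; no queue, no visited set, no per-state step counters.
--     rows, cols = len(board), len(board[0])
--     moves = {'U': (-1, 0), 'L': (0, -1), 'D': (1, 0), 'R': (0, 1)}
--     best = min_distance
--     dp = {(0, 0): 0}
--     s = 0
--     while dp and s <= limit:
--         ndp = {}
--         for (r, c), ch in dp.items():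
--             if (r, c) == end:
--                 best = min(ch, best)
--             for mv, (dy, dx) in moves.items():
--                 rr, cc = r + dy, c + dx
--                 if 0 <= rr < rows and 0 <= cc < cols:
--                     w = ch + (board[r][c] != mv)
--                     if (rr, cc) not in ndp or w < ndp[(rr, cc)]:
--                         ndp[(rr, cc)] = w
--         dp = ndp
--         s += 1
--     return best
-- ===== Notes on version B (the rewrite author's own statement) =====
-- stated objective: alternative
-- what changed: A is a FIFO BFS over (cell, changes) states with a deque, per-state step counters and a nested dict seen[cell][changes]=min_steps; B is a step-indexed dynamic program: one dict per level mapping each cell to the minimum change count over walks of exactly s steps, relaxed level by level, so the (cell, changes) state space, the queue and the visited bookkeeping all disappear.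
import Mathlib
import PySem

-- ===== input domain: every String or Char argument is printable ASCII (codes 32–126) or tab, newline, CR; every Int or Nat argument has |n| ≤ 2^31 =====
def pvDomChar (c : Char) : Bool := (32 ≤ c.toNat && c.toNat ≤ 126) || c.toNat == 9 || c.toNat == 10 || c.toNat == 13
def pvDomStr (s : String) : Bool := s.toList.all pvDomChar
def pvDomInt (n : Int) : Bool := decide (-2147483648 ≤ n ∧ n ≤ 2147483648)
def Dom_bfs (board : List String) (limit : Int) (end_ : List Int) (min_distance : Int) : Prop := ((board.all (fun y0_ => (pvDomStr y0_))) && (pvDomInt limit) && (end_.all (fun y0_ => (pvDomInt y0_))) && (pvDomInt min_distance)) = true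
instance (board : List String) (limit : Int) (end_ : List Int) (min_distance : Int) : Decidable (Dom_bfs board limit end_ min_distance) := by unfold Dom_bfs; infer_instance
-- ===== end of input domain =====

-- B replaces A's FIFO BFS over (cell, changes) states (deque, per-state step counters,
-- nested dict seen[cell][changes] = min steps) by a step-indexed dynamic program: one
-- dict per level mapping each cell to the minimum change count over walks of exactly
-- s steps, relaxed level by level (one entry per cell instead of one per (cell, changes)
-- pair); same return value, no speed claim.

-- ===== PORT A =====

-- Python `(r, c) == end` where `end : tuple[int,...]`: true iff end is exactly the 2-tuple (r, c)
def pairEqList (r c : Int) (e : List Int) : Bool := decide (e = [r, c])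

-- board[r][c], total form; reads outside the board (excluded by Pre_) get a default
def charAt (board : List String) (r c : Int) : Char :=
  PySem.List.pyGetD (PySem.List.pyGetD board r "").toList c ' '

-- moves = {'U': (-1,0), 'L': (0,-1), 'D': (1,0), 'R': (0,1)}, iterated via .items()
def movesItems : List (Char × Int × Int) := [('U', (-1, 0)), ('L', (0, -1)), ('D', (1, 0)), ('R', (0, 1))]

-- body of A's `for move, (y, x) in moves.items()` loop, threading (queue, seen)
def astep (board : List String) (rows cols r c changes steps : Int)
    (qs : List ((Int × Int) × Int × Int) × PySem.Dict (Int × Int) (PySem.Dict Int Int))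
    (m : Char × Int × Int) :
    List ((Int × Int) × Int × Int) × PySem.Dict (Int × Int) (PySem.Dict Int Int) :=
  let rr := r + m.2.1
  let cc := c + m.2.2
  if 0 ≤ rr ∧ rr < rows ∧ 0 ≤ cc ∧ cc < cols then
    let new_changes := changes + (if charAt board r c ≠ m.1 then 1 else 0)
    let ns := ((rr, cc), new_changes, steps + 1)
    match qs.2.get? (rr, cc) with
    | some inner =>
      match inner.get? new_changes with
      | some old =>
          if steps + 1 < old then
            (qs.1 ++ [ns], qs.2.insert (rr, cc) (inner.insert new_changes (steps + 1)))
          else qs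
      | none => (qs.1 ++ [ns], qs.2.insert (rr, cc) (inner.insert new_changes (steps + 1)))
    | none =>
        (qs.1 ++ [ns], qs.2.insert (rr, cc) (PySem.Dict.empty.insert new_changes (steps + 1)))
  else qs

-- A's `while queue` loop (fuel-guarded; bfs supplies enough fuel for every pop)
def aloop (board : List String) (limit : Int) (end_ : List Int) (rows cols : Int) :
    Nat → List ((Int × Int) × Int × Int) → PySem.Dict (Int × Int) (PySem.Dict Int Int) → Int → Int
  | 0, _, _, lc => lc
  | _ + 1, [], _, lc => lc
  | fuel + 1, ((r, c), changes, steps) :: rest, seen, lc =>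
    if steps > limit then aloop board limit end_ rows cols fuel rest seen lc
    else
      let lc := if pairEqList r c end_ then min changes lc else lc
      let qs := movesItems.foldl (astep board rows cols r c changes steps) (rest, seen)
      aloop board limit end_ rows cols fuel qs.1 qs.2 lc

def bfs (board : List String) (limit : Int) (end_ : List Int) (min_distance : Int) : Int :=
  let rows : Int := board.length
  let cols : Int := PySem.Str.len (PySem.List.pyGetD board 0 "")
  -- every append inserts a fresh (cell, changes) key, changes ≤ limit+1: this fuel covers every pop
  let fuel : Nat := board.length * cols.toNat * (limit.toNat + 2) + 1
  aloop board limit end_ rows cols fuel [((0, 0), 0, 0)]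
    (PySem.Dict.empty.insert (0, 0) (PySem.Dict.empty.insert 0 0)) min_distance

-- ===== PORT B =====

-- body of B's inner move loop: relax the min-changes entry of the target cell in ndp
def dstep (board : List String) (rows cols r c ch : Int)
    (ndp : PySem.Dict (Int × Int) Int) (m : Char × Int × Int) : PySem.Dict (Int × Int) Int :=
  let rr := r + m.2.1
  let cc := c + m.2.2
  if 0 ≤ rr ∧ rr < rows ∧ 0 ≤ cc ∧ cc < cols then
    let w := ch + (if charAt board r c ≠ m.1 then 1 else 0)
    match ndp.get? (rr, cc) with
    | none => ndp.insert (rr, cc) w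
    | some old => if w < old then ndp.insert (rr, cc) w else ndp
  else ndp

-- body of B's `for (r, c), ch in dp.items()` loop, threading (ndp, best)
def ditem (board : List String) (end_ : List Int) (rows cols : Int)
    (st : PySem.Dict (Int × Int) Int × Int) (it : (Int × Int) × Int) :
    PySem.Dict (Int × Int) Int × Int :=
  let best := if pairEqList it.1.1 it.1.2 end_ then min it.2 st.2 else st.2
  (movesItems.foldl (dstep board rows cols it.1.1 it.1.2 it.2) st.1, best)

-- B's `while dp and s <= limit` loop (fuel-guarded; one tick per level)
def dloop (board : List String) (limit : Int) (end_ : List Int) (rows cols : Int) :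
    Nat → PySem.Dict (Int × Int) Int → Int → Int → Int
  | 0, _, _, best => best
  | fuel + 1, dp, s, best =>
    if dp.items = [] ∨ s > limit then best
    else
      let t := dp.items.foldl (ditem board end_ rows cols) (PySem.Dict.empty, best)
      dloop board limit end_ rows cols fuel t.1 (s + 1) t.2

def bfs_alt (board : List String) (limit : Int) (end_ : List Int) (min_distance : Int) : Int :=
  let rows : Int := board.length
  let cols : Int := PySem.Str.len (PySem.List.pyGetD board 0 "")
  dloop board limit end_ rows cols (limit.toNat + 2)
    (PySem.Dict.empty.insert (0, 0) 0) 0 min_distance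

-- ===== PRECONDITION & SPEC =====

-- Pre_ excludes exactly the inputs on which the Python raises an IndexError: the empty board
-- (board[0]), and ragged boards where some cell (r, c) with c < len(board[0]) that the BFS
-- reads (r + c ≤ limit, and the grid has a neighbour to step to) lies beyond its own row.
def Pre_bfs (board : List String) (limit : Int) (end_ : List Int) (min_distance : Int) : Prop :=
  board ≠ [] ∧
  ((2 ≤ board.length ∨ 2 ≤ PySem.Str.len (board.headD "")) →
    ∀ r < board.length, ∀ c < (PySem.Str.len (board.headD "")).toNat,
      ((r : Int) + (c : Int) ≤ limit → (c : Int) < PySem.Str.len (board.getD r "")))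
instance (board : List String) (limit : Int) (end_ : List Int) (min_distance : Int) : Decidable (Pre_bfs board limit end_ min_distance) := by unfold Pre_bfs; infer_instance

def pvWitness_bfs : List String × Int × List Int × Int := (["RD", "DL"], 2, [1, 1], 5)

def Spec_bfs (board : List String) (limit : Int) (end_ : List Int) (min_distance : Int) (out : Int) : Prop := out = bfs_alt board limit end_ min_distance
instance (board : List String) (limit : Int) (end_ : List Int) (min_distance : Int) (out : Int) : Decidable (Spec_bfs board limit end_ min_distance out) := by unfold Spec_bfs; infer_instance

-- ===== CLAIM (what is proved, stated in full; the proofs are below) =====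
def Claim_equal_bfs : Prop := ∀ (board : List String) (limit : Int) (end_ : List Int) (min_distance : Int), Dom_bfs board limit end_ min_distance → Pre_bfs board limit end_ min_distance → Spec_bfs board limit end_ min_distance (bfs board limit end_ min_distance)

-- ===== LEMMAS AND PROOFS =====

-- ---------- proof-only reference: a level-synchronous BFS (used as a bridge between A and B) ----------

def bstep (board : List String) (rows cols r c ch : Int)
    (st : List ((Int × Int) × Int) × PySem.Set ((Int × Int) × Int)) (m : Char × Int × Int) :
    List ((Int × Int) × Int) × PySem.Set ((Int × Int) × Int) :=
  let rr := r + m.2.1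
  let cc := c + m.2.2
  if 0 ≤ rr ∧ rr < rows ∧ 0 ≤ cc ∧ cc < cols then
    let k := ((rr, cc), ch + (if charAt board r c ≠ m.1 then 1 else 0))
    if PySem.Set.contains st.2 k then st else (st.1 ++ [k], PySem.Set.add st.2 k)
  else st

def bitem (board : List String) (end_ : List Int) (rows cols : Int)
    (st : List ((Int × Int) × Int) × PySem.Set ((Int × Int) × Int) × Int) (it : (Int × Int) × Int) :
    List ((Int × Int) × Int) × PySem.Set ((Int × Int) × Int) × Int :=
  let best := if pairEqList it.1.1 it.1.2 end_ then min it.2 st.2.2 else st.2.2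
  let nv := movesItems.foldl (bstep board rows cols it.1.1 it.1.2 it.2) (st.1, st.2.1)
  (nv.1, nv.2, best)

def bloop (board : List String) (limit : Int) (end_ : List Int) (rows cols : Int) :
    Nat → List ((Int × Int) × Int) → PySem.Set ((Int × Int) × Int) → Int → Int → Int
  | 0, _, _, _, best => best
  | fuel + 1, frontier, vis, s, best =>
    if frontier = [] ∨ s > limit then best
    else
      let t := frontier.foldl (bitem board end_ rows cols) ([], vis, best)
      bloop board limit end_ rows cols fuel t.1 t.2.1 (s + 1) t.2.2

def lbfs (board : List String) (limit : Int) (end_ : List Int) (min_distance : Int) : Int :=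
  let rows : Int := board.length
  let cols : Int := PySem.Str.len (PySem.List.pyGetD board 0 "")
  bloop board limit end_ rows cols (limit.toNat + 2) [((0, 0), 0)]
    (PySem.Set.add PySem.Set.empty ((0, 0), 0)) 0 min_distance

-- ---------- Part 1: A's deque BFS equals the level-synchronous BFS ----------

-- abbreviations used only by the proofs
def tag (s : Int) (k : (Int × Int) × Int) : (Int × Int) × Int × Int := (k.1, k.2, s)

-- "(cell, changes) is a key of A's nested seen structure"
def SMem (seen : PySem.Dict (Int × Int) (PySem.Dict Int Int)) (k : (Int × Int) × Int) : Prop :=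
  ∃ inner v, seen.get? k.1 = some inner ∧ inner.get? k.2 = some v

-- bound on the number of distinct (cell, changes) keys ever inserted
def KC (rows cols limit : Int) : Nat := rows.toNat * cols.toNat * (limit + 2).toNat + 1

def KeyOK (rows cols limit : Int) (k : (Int × Int) × Int) : Prop :=
  k = ((0, 0), 0) ∨ (0 ≤ k.1.1 ∧ k.1.1 < rows ∧ 0 ≤ k.1.2 ∧ k.1.2 < cols ∧ 0 ≤ k.2 ∧ k.2 ≤ limit + 1)

theorem visLen_le {rows cols limit : Int} {vis : List ((Int × Int) × Int)}
    (hNd : vis.Nodup) (hVB : ∀ k ∈ vis, KeyOK rows cols limit k) :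
    vis.length ≤ KC rows cols limit := by
  classical
  have hsub : vis.toFinset ⊆
      insert (((0, 0), 0) : (Int × Int) × Int)
        (((Finset.Ico (0 : Int) rows) ×ˢ (Finset.Ico (0 : Int) cols)) ×ˢ (Finset.Ico (0 : Int) (limit + 2))) := by
    intro k hk
    rcases hVB k (List.mem_toFinset.mp hk) with h | h
    · simp [h]
    · rcases k with ⟨⟨a, b⟩, c2⟩
      apply Finset.mem_insert_of_mem
      simp only [Finset.mem_product, Finset.mem_Ico]
      obtain ⟨h1, h2, h3, h4, h5, h6⟩ := h
      refine ⟨⟨⟨h1, h2⟩, h3, h4⟩, h5, by omega⟩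
  have h1 : vis.length = vis.toFinset.card := (List.toFinset_card_of_nodup hNd).symm
  have h2 := Finset.card_le_card hsub
  have h3 := Finset.card_insert_le (((0, 0), 0) : (Int × Int) × Int)
      (((Finset.Ico (0 : Int) rows) ×ˢ (Finset.Ico (0 : Int) cols)) ×ˢ (Finset.Ico (0 : Int) (limit + 2)))
  have h4 : ((((Finset.Ico (0 : Int) rows) ×ˢ (Finset.Ico (0 : Int) cols)) ×ˢ (Finset.Ico (0 : Int) (limit + 2))).card)
      = rows.toNat * cols.toNat * (limit + 2).toNat := by
    simp [Finset.card_product, Int.card_Ico]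
  unfold KC
  omega

theorem bloop_nil (board : List String) (limit : Int) (end_ : List Int) (rows cols : Int)
    (fb : Nat) (vis : PySem.Set ((Int × Int) × Int)) (s best : Int) :
    bloop board limit end_ rows cols fb [] vis s best = best := by
  cases fb <;> simp [bloop]

theorem aloop_skip (board : List String) (limit : Int) (end_ : List Int) (rows cols : Int) :
    ∀ (fa : Nat) (q : List ((Int × Int) × Int × Int)) seen (lc : Int),
    (∀ x ∈ q, limit < x.2.2) → aloop board limit end_ rows cols fa q seen lc = lc := by
  intro fa
  induction fa with
  | zero => intro q seen lc _; simp [aloop]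
  | succ n ih =>
    intro q seen lc h
    cases q with
    | nil => simp [aloop]
    | cons x rest =>
      obtain ⟨⟨r, c⟩, ch, st⟩ := x
      have hst : st > limit := h ((r, c), ch, st) (by simp)
      simp only [aloop, if_pos hst]
      exact ih rest seen lc (fun y hy => h y (List.mem_cons_of_mem _ hy))

theorem SMem_insert_iff (seen : PySem.Dict (Int × Int) (PySem.Dict Int Int)) (cell : Int × Int)
    (inner' : PySem.Dict Int Int) (nch : Int)
    (hpt : ∀ ch', (∃ v, inner'.get? ch' = some v) ↔ (SMem seen (cell, ch') ∨ ch' = nch)) :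
    ∀ k, SMem (seen.insert cell inner') k ↔ (SMem seen k ∨ k = (cell, nch)) := by
  rintro ⟨kc, kch⟩
  unfold SMem
  rw [PySem.Dict.get?_insert]
  by_cases h : kc = cell
  · subst h
    simp only [if_pos rfl]
    constructor
    · rintro ⟨i, v, hi, hv⟩
      have hie : i = inner' := by injection hi with h'; exact h'.symm
      subst hie
      rcases (hpt kch).mp ⟨v, hv⟩ with hsm | he
      · exact Or.inl hsm
      · exact Or.inr (by simp [he])
    · rintro (hsm | heq)
      · rcases (hpt kch).mpr (Or.inl hsm) with ⟨v, hv⟩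
        exact ⟨inner', v, rfl, hv⟩
      · have : kch = nch := by simpa using congrArg Prod.snd heq
        rcases (hpt kch).mpr (Or.inr this) with ⟨v, hv⟩
        exact ⟨inner', v, rfl, hv⟩
  · simp only [if_neg h]
    constructor
    · rintro ⟨i, v, hi, hv⟩
      exact Or.inl ⟨i, v, hi, hv⟩
    · rintro (⟨i, v, hi, hv⟩ | heq)
      · exact ⟨i, v, hi, hv⟩
      · exact absurd (by simpa using congrArg Prod.fst heq) h

theorem val_insert {B : Int} (seen : PySem.Dict (Int × Int) (PySem.Dict Int Int)) (cell : Int × Int)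
    (inner' : PySem.Dict Int Int)
    (hv' : ∀ ch' v, inner'.get? ch' = some v → v ≤ B)
    (hVal : ∀ cell0 i ch' v, seen.get? cell0 = some i → i.get? ch' = some v → v ≤ B) :
    ∀ cell0 i ch' v, (seen.insert cell inner').get? cell0 = some i → i.get? ch' = some v → v ≤ B := by
  intro cell0 i ch' v h1 h2
  rw [PySem.Dict.get?_insert] at h1
  split at h1
  · have : i = inner' := by injection h1 with h'; exact h'.symm
    subst this
    exact hv' _ _ h2
  · exact hVal _ _ _ _ h1 h2

theorem step_corr (board : List String) (rows cols limit : Int) (r c ch s : Int)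
    (m : Char × Int × Int) (R : List ((Int × Int) × Int × Int))
    (nx vis : List ((Int × Int) × Int)) (seen : PySem.Dict (Int × Int) (PySem.Dict Int Int))
    (hMem : ∀ k, SMem seen k ↔ k ∈ vis)
    (hVal : ∀ cell inner ch' v, seen.get? cell = some inner → inner.get? ch' = some v → v ≤ s + 1)
    (hNd : vis.Nodup)
    (hVB : ∀ k ∈ vis, KeyOK rows cols limit k)
    (hWn : ∀ k ∈ nx, 0 ≤ k.2 ∧ k.2 ≤ s + 1)
    (hch0 : 0 ≤ ch) (hchs : ch ≤ s) (hsl : s ≤ limit) :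
    ∃ nx' vis' seen',
      bstep board rows cols r c ch (nx, vis) m = (nx', vis') ∧
      astep board rows cols r c ch s (R ++ nx.map (tag (s + 1)), seen) m
        = (R ++ nx'.map (tag (s + 1)), seen') ∧
      (∀ k, SMem seen' k ↔ k ∈ vis') ∧
      (∀ cell inner ch' v, seen'.get? cell = some inner → inner.get? ch' = some v → v ≤ s + 1) ∧
      vis'.Nodup ∧ (∀ k ∈ vis', KeyOK rows cols limit k) ∧
      (∀ k ∈ nx', 0 ≤ k.2 ∧ k.2 ≤ s + 1) ∧
      vis'.length + nx.length = vis.length + nx'.length := by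
  classical
  by_cases hb : 0 ≤ r + m.2.1 ∧ r + m.2.1 < rows ∧ 0 ≤ c + m.2.2 ∧ c + m.2.2 < cols
  · set rr := r + m.2.1 with hrr
    set cc := c + m.2.2 with hcc
    set nch := ch + (if charAt board r c ≠ m.1 then 1 else 0) with hnchdef
    have hnchb : ch ≤ nch ∧ nch ≤ ch + 1 := by
      rw [hnchdef]; split <;> omega
    by_cases hk : ((rr, cc), nch) ∈ vis
    · obtain ⟨inner, v, hin, hv⟩ := (hMem _).mpr hk
      have hvle : v ≤ s + 1 := hVal _ _ _ _ hin hv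
      have hin2 : seen.get? (rr, cc) = some inner := hin
      have hv2 : inner.get? nch = some v := hv
      refine ⟨nx, vis, seen, ?_, ?_, hMem, hVal, hNd, hVB, hWn, by omega⟩
      · have hcont : PySem.Set.contains vis ((rr, cc), nch) = true := by
          rw [PySem.Set.contains_iff]; exact hk
        simp only [bstep]
        rw [← hrr, ← hcc, ← hnchdef]
        rw [if_pos hb, hcont]
        simp
      · simp only [astep]
        rw [← hrr, ← hcc, ← hnchdef]
        rw [if_pos hb]
        simp only [hin2, hv2]
        rw [if_neg (by omega : ¬ s + 1 < v)]
    · have hnot : ¬ SMem seen ((rr, cc), nch) := fun hsm => hk ((hMem _).mp hsm)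
      have hcont : PySem.Set.contains vis ((rr, cc), nch) = false := by
        cases hC : PySem.Set.contains vis ((rr, cc), nch)
        · rfl
        · exfalso
          apply hk
          rw [← PySem.Set.contains_iff vis ((rr, cc), nch)]
          exact hC
      have hbst : bstep board rows cols r c ch (nx, vis) m
          = (nx ++ [((rr, cc), nch)], vis ++ [((rr, cc), nch)]) := by
        simp only [bstep]
        rw [← hrr, ← hcc, ← hnchdef]
        rw [if_pos hb, hcont]
        simp [PySem.Set.add_of_not_mem hk]
      have hmemapp : ∀ k', (k' ∈ vis ++ [((rr, cc), nch)]) ↔ (k' ∈ vis ∨ k' = ((rr, cc), nch)) := by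
        intro k'; simp
      have hnd' : (vis ++ [((rr, cc), nch)]).Nodup := by
        simp only [List.nodup_append, List.nodup_cons, List.not_mem_nil, not_false_iff, List.nodup_nil, and_true, true_and]
        refine ⟨hNd, ?_⟩
        intro a ha b hb2
        simp only [List.mem_singleton] at hb2
        subst hb2
        exact fun he => hk (he ▸ ha)
      have hvb' : ∀ k' ∈ vis ++ [((rr, cc), nch)], KeyOK rows cols limit k' := by
        intro k' hk'
        rcases List.mem_append.mp hk' with h | h
        · exact hVB _ h
        · have : k' = ((rr, cc), nch) := by simpa using h
          subst this
          exact Or.inr ⟨hb.1, hb.2.1, hb.2.2.1, hb.2.2.2, by omega, by omega⟩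
      have hwn' : ∀ k' ∈ nx ++ [((rr, cc), nch)], 0 ≤ k'.2 ∧ k'.2 ≤ s + 1 := by
        intro k' hk'
        rcases List.mem_append.mp hk' with h | h
        · exact hWn _ h
        · have : k' = ((rr, cc), nch) := by simpa using h
          subst this
          exact ⟨by omega, by omega⟩
      rcases hseen : seen.get? (rr, cc) with _ | inner
      · -- (rr, cc) not yet a key of seen
        refine ⟨nx ++ [((rr, cc), nch)], vis ++ [((rr, cc), nch)],
          seen.insert (rr, cc) (PySem.Dict.empty.insert nch (s + 1)), hbst, ?_, ?_, ?_, hnd', hvb', hwn',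
          by simp only [List.length_append, List.length_cons, List.length_nil]; omega⟩
        · simp only [astep]
          rw [← hrr, ← hcc, ← hnchdef]
          rw [if_pos hb]
          simp only [hseen]
          simp [tag]
        · intro k'
          rw [SMem_insert_iff seen (rr, cc) _ nch ?_ k', hMem k', ← hmemapp k']
          intro ch'
          rw [PySem.Dict.get?_insert]
          constructor
          · rintro ⟨v', hv'⟩
            split at hv'
            · exact Or.inr (by assumption)
            · exact absurd hv' (by simp [PySem.Dict.get?_empty])
          · rintro (⟨i, v', hi, hv'⟩ | he)
            · rw [hseen] at hi; cases hi
            · exact ⟨s + 1, by simp [he]⟩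
        · refine val_insert seen (rr, cc) _ ?_ hVal
          intro ch' v' hv'
          rw [PySem.Dict.get?_insert] at hv'
          split at hv'
          · injection hv' with h'; omega
          · exact absurd hv' (by simp [PySem.Dict.get?_empty])
      · -- (rr, cc) is a key, nch is not in its inner dict
        have hvnone : inner.get? nch = none := by
          cases hN : inner.get? nch
          · rfl
          · exact absurd ⟨inner, _, hseen, hN⟩ hnot
        refine ⟨nx ++ [((rr, cc), nch)], vis ++ [((rr, cc), nch)],
          seen.insert (rr, cc) (inner.insert nch (s + 1)), hbst, ?_, ?_, ?_, hnd', hvb', hwn',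
          by simp only [List.length_append, List.length_cons, List.length_nil]; omega⟩
        · simp only [astep]
          rw [← hrr, ← hcc, ← hnchdef]
          rw [if_pos hb]
          simp only [hseen, hvnone]
          simp [tag]
        · intro k'
          rw [SMem_insert_iff seen (rr, cc) _ nch ?_ k', hMem k', ← hmemapp k']
          intro ch'
          rw [PySem.Dict.get?_insert]
          constructor
          · rintro ⟨v', hv'⟩
            split at hv'
            · exact Or.inr (by assumption)
            · exact Or.inl ⟨inner, v', hseen, hv'⟩
          · rintro (⟨i, v', hi, hv'⟩ | he)
            · rw [hseen] at hi
              have : i = inner := by injection hi with h'; exact h'.symm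
              subst this
              refine ⟨v', ?_⟩
              split
              · next hEq => rw [hEq] at hv'; rw [hv'] at hvnone; cases hvnone
              · exact hv'
            · exact ⟨s + 1, by simp [he]⟩
        · refine val_insert seen (rr, cc) _ ?_ hVal
          intro ch' v' hv'
          rw [PySem.Dict.get?_insert] at hv'
          split at hv'
          · injection hv' with h'; omega
          · exact hVal _ _ _ _ hseen hv'
  · refine ⟨nx, vis, seen, ?_, ?_, hMem, hVal, hNd, hVB, hWn, by omega⟩
    · simp [bstep, hb]
    · simp [astep, hb]

theorem fold_corr (board : List String) (rows cols limit : Int) (r c ch s : Int)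
    (ms : List (Char × Int × Int)) :
    ∀ (R : List ((Int × Int) × Int × Int)) (nx vis : List ((Int × Int) × Int))
      (seen : PySem.Dict (Int × Int) (PySem.Dict Int Int)),
    (∀ k, SMem seen k ↔ k ∈ vis) →
    (∀ cell inner ch' v, seen.get? cell = some inner → inner.get? ch' = some v → v ≤ s + 1) →
    vis.Nodup → (∀ k ∈ vis, KeyOK rows cols limit k) →
    (∀ k ∈ nx, 0 ≤ k.2 ∧ k.2 ≤ s + 1) → 0 ≤ ch → ch ≤ s → s ≤ limit →
    ∃ nx' vis' seen',
      ms.foldl (bstep board rows cols r c ch) (nx, vis) = (nx', vis') ∧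
      ms.foldl (astep board rows cols r c ch s) (R ++ nx.map (tag (s + 1)), seen)
        = (R ++ nx'.map (tag (s + 1)), seen') ∧
      (∀ k, SMem seen' k ↔ k ∈ vis') ∧
      (∀ cell inner ch' v, seen'.get? cell = some inner → inner.get? ch' = some v → v ≤ s + 1) ∧
      vis'.Nodup ∧ (∀ k ∈ vis', KeyOK rows cols limit k) ∧
      (∀ k ∈ nx', 0 ≤ k.2 ∧ k.2 ≤ s + 1) ∧
      vis'.length + nx.length = vis.length + nx'.length := by
  induction ms with
  | nil =>
    intro R nx vis seen hMem hVal hNd hVB hWn hch0 hchs hsl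
    exact ⟨nx, vis, seen, rfl, rfl, hMem, hVal, hNd, hVB, hWn, rfl⟩
  | cons m ms ih =>
    intro R nx vis seen hMem hVal hNd hVB hWn hch0 hchs hsl
    obtain ⟨nx1, vis1, seen1, hb1, ha1, hm1, hv1, hn1, hvb1, hwn1, hlen1⟩ :=
      step_corr board rows cols limit r c ch s m R nx vis seen hMem hVal hNd hVB hWn hch0 hchs hsl
    obtain ⟨nx', vis', seen', hb2, ha2, hm2, hv2, hn2, hvb2, hwn2, hlen2⟩ :=
      ih R nx1 vis1 seen1 hm1 hv1 hn1 hvb1 hwn1 hch0 hchs hsl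
    refine ⟨nx', vis', seen', ?_, ?_, hm2, hv2, hn2, hvb2, hwn2, by omega⟩
    · rw [List.foldl_cons, hb1, hb2]
    · rw [List.foldl_cons, ha1, ha2]

-- the simulation invariant: A's queue is (rest of current level at s) ++ (next level at s+1),
-- seen's key set is the level BFS's visited set, all stored step values are ≤ s+1
theorem main_sim (board : List String) (limit : Int) (end_ : List Int) (rows cols : Int) :
    ∀ (fa fb : Nat) (current next vis : List ((Int × Int) × Int))
      (seen : PySem.Dict (Int × Int) (PySem.Dict Int Int)) (s best : Int),
    (∀ k, SMem seen k ↔ k ∈ vis) →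
    (∀ cell inner ch' v, seen.get? cell = some inner → inner.get? ch' = some v → v ≤ s + 1) →
    vis.Nodup → (∀ k ∈ vis, KeyOK rows cols limit k) →
    (∀ k ∈ current, 0 ≤ k.2 ∧ k.2 ≤ s) → (∀ k ∈ next, 0 ≤ k.2 ∧ k.2 ≤ s + 1) →
    0 ≤ s → s ≤ limit →
    current.length + next.length + KC rows cols limit ≤ fa + vis.length →
    limit + 1 - s ≤ (fb : Int) →
    aloop board limit end_ rows cols fa (current.map (tag s) ++ next.map (tag (s + 1))) seen best
      = (let t := current.foldl (bitem board end_ rows cols) (next, vis, best);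
         bloop board limit end_ rows cols fb t.1 t.2.1 (s + 1) t.2.2) := by
  intro fa
  induction fa with
  | zero =>
    intro fb current next vis seen s best hMem hVal hNd hVB hWc hWn hs0 hsl hfa hfb
    have hK := visLen_le hNd hVB
    have hc0 : current = [] := List.length_eq_zero_iff.mp (by omega)
    have hn0 : next = [] := List.length_eq_zero_iff.mp (by omega)
    subst hc0; subst hn0
    simp only [List.map_nil, List.append_nil, List.foldl_nil]
    rw [bloop_nil]
    simp [aloop]
  | succ fa ih =>
    have hcons : ∀ (fb : Nat) (pr pc pch : Int) (rest next vis : List ((Int × Int) × Int))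
        (seen : PySem.Dict (Int × Int) (PySem.Dict Int Int)) (s best : Int),
        (∀ k, SMem seen k ↔ k ∈ vis) →
        (∀ cell inner ch' v, seen.get? cell = some inner → inner.get? ch' = some v → v ≤ s + 1) →
        vis.Nodup → (∀ k ∈ vis, KeyOK rows cols limit k) →
        (∀ k ∈ (((pr, pc), pch) :: rest : List ((Int × Int) × Int)), 0 ≤ k.2 ∧ k.2 ≤ s) →
        (∀ k ∈ next, 0 ≤ k.2 ∧ k.2 ≤ s + 1) →
        0 ≤ s → s ≤ limit →
        (((pr, pc), pch) :: rest : List ((Int × Int) × Int)).length + next.length + KC rows cols limit ≤ (fa + 1) + vis.length →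
        limit + 1 - s ≤ (fb : Int) →
        aloop board limit end_ rows cols (fa + 1)
            ((((pr, pc), pch) :: rest).map (tag s) ++ next.map (tag (s + 1))) seen best
          = (let t := (((pr, pc), pch) :: rest).foldl (bitem board end_ rows cols) (next, vis, best);
             bloop board limit end_ rows cols fb t.1 t.2.1 (s + 1) t.2.2) := by
      intro fb pr pc pch rest next vis seen s best hMem hVal hNd hVB hWc hWn hs0 hsl hfa hfb
      obtain ⟨nx', vis', seen', hbf, haf, hm', hv', hn', hvb', hwn', hlen⟩ :=
        fold_corr board rows cols limit pr pc pch s movesItems (rest.map (tag s)) next vis seen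
          hMem hVal hNd hVB hWn (hWc ((pr, pc), pch) (by simp)).1 (hWc ((pr, pc), pch) (by simp)).2 hsl
      have hbi : bitem board end_ rows cols (next, vis, best) ((pr, pc), pch)
          = (nx', vis', if pairEqList pr pc end_ then min pch best else best) := by
        simp only [bitem]
        rw [hbf]
      have hih := ih fb rest nx' vis' seen' s (if pairEqList pr pc end_ then min pch best else best)
        hm' hv' hn' hvb' (fun k hk => hWc k (by simp [hk])) hwn' hs0 hsl
        (by simp only [List.length_cons] at hfa; omega) hfb
      simp only [List.map_cons, List.cons_append, tag]
      simp only [aloop]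
      rw [if_neg (by omega : ¬ s > limit)]
      rw [haf]
      simp only []
      rw [hih]
      simp only [List.foldl_cons]
      rw [hbi]
    intro fb current next vis seen s best hMem hVal hNd hVB hWc hWn hs0 hsl hfa hfb
    cases current with
    | cons p rest =>
      obtain ⟨⟨pr, pc⟩, pch⟩ := p
      exact hcons fb pr pc pch rest next vis seen s best hMem hVal hNd hVB hWc hWn hs0 hsl hfa hfb
    | nil =>
      simp only [List.map_nil, List.nil_append, List.foldl_nil]
      cases next with
      | nil =>
        rw [bloop_nil]
        simp [aloop]
      | cons q qs =>
        by_cases hsl2 : s + 1 ≤ limit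
        · cases fb with
          | zero => exfalso; omega
          | succ fb' =>
            obtain ⟨⟨qr, qc⟩, qch⟩ := q
            have hstep := hcons fb' qr qc qch qs [] vis seen (s + 1) best hMem
              (fun cell inner ch' v h1 h2 => by have := hVal cell inner ch' v h1 h2; omega)
              hNd hVB (fun k hk => hWn k hk) (by simp) (by omega) hsl2
              (by simp only [List.length_cons, List.length_nil] at hfa ⊢; omega)
              (by push_cast at hfb ⊢; omega)
            simp only [List.map_nil, List.append_nil] at hstep
            rw [hstep]
            show _ = bloop board limit end_ rows cols (fb' + 1) (((qr, qc), qch) :: qs) vis (s + 1) best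
            simp only [bloop]
            rw [if_neg (by simp; omega)]
        · rw [aloop_skip board limit end_ rows cols (fa + 1) _ seen best ?_]
          · cases fb with
            | zero => simp [bloop]
            | succ fb' =>
              simp only [bloop]
              rw [if_pos (Or.inr (by omega))]
          · intro x hx
            obtain ⟨k, hk, rfl⟩ := List.mem_map.mp hx
            simp only [tag]
            omega

theorem bfs_eq_lbfs : ∀ (board : List String) (limit : Int) (end_ : List Int) (min_distance : Int),
    bfs board limit end_ min_distance = lbfs board limit end_ min_distance := by
  intro board limit end_ md
  simp only [bfs, lbfs]
  have hvis0 : PySem.Set.add PySem.Set.empty (((0 : Int), (0 : Int)), (0 : Int))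
      = [((0, 0), 0)] := rfl
  rw [hvis0]
  by_cases hl : 0 ≤ limit
  · -- the simulation, started from the two initial states
    have hM : ∀ k : (Int × Int) × Int,
        SMem (PySem.Dict.empty.insert ((0 : Int), (0 : Int)) (PySem.Dict.empty.insert (0 : Int) (0 : Int))) k
          ↔ k ∈ ([((0, 0), 0)] : List ((Int × Int) × Int)) := by
      rintro ⟨kc, kch⟩
      simp only [List.mem_singleton]
      constructor
      · rintro ⟨i, v, hi, hv⟩
        rw [PySem.Dict.get?_insert] at hi
        split at hi
        · next hkc =>
          have hie : i = PySem.Dict.empty.insert 0 0 := by injection hi with h'; exact h'.symm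
          subst hie
          rw [PySem.Dict.get?_insert] at hv
          split at hv
          · next hkch =>
              have h1 : kc = (0, 0) := hkc
              have h2 : kch = 0 := hkch
              rw [h1, h2]
          · rw [PySem.Dict.get?_empty] at hv; cases hv
        · rw [PySem.Dict.get?_empty] at hi; cases hi
      · intro h
        have h1 : kc = (0, 0) := by simpa using congrArg Prod.fst h
        have h2 : kch = 0 := by simpa using congrArg Prod.snd h
        subst h1; subst h2
        exact ⟨PySem.Dict.empty.insert 0 0, 0,
          by rw [PySem.Dict.get?_insert]; simp,
          by rw [PySem.Dict.get?_insert]; simp⟩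
    have hV : ∀ (cell : Int × Int) (inner : PySem.Dict Int Int) (ch' v : Int),
        (PySem.Dict.empty.insert ((0 : Int), (0 : Int)) (PySem.Dict.empty.insert (0 : Int) (0 : Int))).get? cell
            = some inner →
        inner.get? ch' = some v → v ≤ (0 : Int) + 1 := by
      intro cell i ch' v h1 h2
      rw [PySem.Dict.get?_insert] at h1
      split at h1
      · have hie : i = PySem.Dict.empty.insert 0 0 := by injection h1 with h'; exact h'.symm
        subst hie
        rw [PySem.Dict.get?_insert] at h2
        split at h2
        · injection h2 with h'; omega
        · rw [PySem.Dict.get?_empty] at h2; cases h2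
      · rw [PySem.Dict.get?_empty] at h1; cases h1
    have hmain := main_sim board limit end_ (board.length : Int)
        (PySem.Str.len (PySem.List.pyGetD board 0 ""))
        (board.length * (PySem.Str.len (PySem.List.pyGetD board 0 "")).toNat * (limit.toNat + 2) + 1)
        (limit.toNat + 1) [((0, 0), 0)] [] [((0, 0), 0)]
        (PySem.Dict.empty.insert (0, 0) (PySem.Dict.empty.insert 0 0)) 0 md
        hM hV (by simp)
        (by intro k hk; simp only [List.mem_singleton] at hk; subst hk; exact Or.inl rfl)
        (by intro k hk; simp only [List.mem_singleton] at hk; subst hk; exact ⟨le_refl 0, le_refl 0⟩)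
        (by simp) le_rfl hl
        (by
          simp only [List.length_cons, List.length_nil]
          unfold KC
          have hmul : ((board.length : Int)).toNat * (PySem.Str.len (PySem.List.pyGetD board 0 "")).toNat
                * (limit + 2).toNat
              ≤ board.length * (PySem.Str.len (PySem.List.pyGetD board 0 "")).toNat * (limit.toNat + 2) := by
            have e1 : ((board.length : Int)).toNat = board.length := by simp
            rw [e1]
            exact Nat.mul_le_mul_left _ (by omega)
          omega)
        (by push_cast; omega)
    have hrhs : bloop board limit end_ (board.length : Int)
          (PySem.Str.len (PySem.List.pyGetD board 0 "")) (limit.toNat + 2) [((0, 0), 0)] [((0, 0), 0)] 0 md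
        = (let t := ([((0, 0), 0)] : List ((Int × Int) × Int)).foldl
              (bitem board end_ (board.length : Int) (PySem.Str.len (PySem.List.pyGetD board 0 "")))
              ([], [((0, 0), 0)], md);
           bloop board limit end_ (board.length : Int) (PySem.Str.len (PySem.List.pyGetD board 0 ""))
             (limit.toNat + 1) t.1 t.2.1 (0 + 1) t.2.2) := by
      show bloop _ _ _ _ _ ((limit.toNat + 1) + 1) _ _ _ _ = _
      simp only [bloop]
      rw [if_neg (by simp; omega)]
    rw [hrhs]
    simpa [tag] using hmain
  · -- limit < 0: the start state is popped and skipped, B's loop guard fails at once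
    have hskip : ∀ x ∈ ([(((0 : Int), (0 : Int)), (0 : Int), (0 : Int))] : List ((Int × Int) × Int × Int)),
        limit < x.2.2 := by
      intro x hx
      simp only [List.mem_singleton] at hx
      subst hx
      exact (by omega : limit < 0)
    rw [aloop_skip _ _ _ _ _ _ _ _ _ hskip]
    show md = bloop _ _ _ _ _ ((limit.toNat + 1) + 1) _ _ _ _
    simp only [bloop]
    rw [if_pos (Or.inr (by omega))]

-- ---------- Part 2: walks, the optimum they define, and that both loops compute it ----------

-- a walk of n in-bounds moves from state a, accumulating the change cost of each move
inductive RF (board : List String) (rows cols : Int) (a : (Int × Int) × Int) :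
    Nat → (Int × Int) × Int → Prop
  | refl : RF board rows cols a 0 a
  | step {s : Nat} {r c ch : Int} (m : Char × Int × Int)
      (h : RF board rows cols a s ((r, c), ch)) (hm : m ∈ movesItems)
      (hb : 0 ≤ r + m.2.1 ∧ r + m.2.1 < rows ∧ 0 ≤ c + m.2.2 ∧ c + m.2.2 < cols) :
      RF board rows cols a (s + 1)
        ((r + m.2.1, c + m.2.2), ch + (if charAt board r c ≠ m.1 then 1 else 0))

-- reachable from the start in exactly s steps
def Rch (board : List String) (rows cols : Int) (s : Nat) (k : (Int × Int) × Int) : Prop :=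
  RF board rows cols ((0, 0), 0) s k

-- first reached at exactly s steps
def dAt (board : List String) (rows cols : Int) (s : Nat) (k : (Int × Int) × Int) : Prop :=
  Rch board rows cols s k ∧ ∀ t < s, ¬ Rch board rows cols t k

-- one in-bounds move
def EdgeR (board : List String) (rows cols : Int) (k k' : (Int × Int) × Int) : Prop :=
  ∃ m ∈ movesItems, (0 ≤ k.1.1 + m.2.1 ∧ k.1.1 + m.2.1 < rows ∧ 0 ≤ k.1.2 + m.2.2 ∧ k.1.2 + m.2.2 < cols) ∧
    k' = ((k.1.1 + m.2.1, k.1.2 + m.2.2), k.2 + (if charAt board k.1.1 k.1.2 ≠ m.1 then 1 else 0))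

def hitE (end_ : List Int) (k : (Int × Int) × Int) : Prop := pairEqList k.1.1 k.1.2 end_ = true

-- "b is the best answer after all levels t < σ have been accounted"
def IsBest (board : List String) (rows cols : Int) (end_ : List Int) (md : Int) (σ : Nat) (b : Int) : Prop :=
  (b = md ∨ ∃ t < σ, ∃ k, Rch board rows cols t k ∧ hitE end_ k ∧ k.2 = b) ∧ b ≤ md ∧
  (∀ t < σ, ∀ k, Rch board rows cols t k → hitE end_ k → b ≤ k.2)

theorem edge_step {board : List String} {rows cols : Int} {s : Nat} {k k' : (Int × Int) × Int}
    (h : Rch board rows cols s k) (he : EdgeR board rows cols k k') :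
    Rch board rows cols (s + 1) k' := by
  obtain ⟨⟨r, c⟩, ch⟩ := k
  obtain ⟨m, hm, hb, hk'⟩ := he
  rw [hk']
  exact RF.step m h hm hb

theorem RF_trans {board : List String} {rows cols : Int} {a b k : (Int × Int) × Int} {s t : Nat}
    (h1 : RF board rows cols a s b) (h2 : RF board rows cols b t k) :
    RF board rows cols a (s + t) k := by
  induction h2 with
  | refl => exact h1
  | step m h hm hb ih => exact RF.step m ih hm hb

theorem RF_split {board : List String} {rows cols : Int} {a b : (Int × Int) × Int} {n : Nat}
    (h : RF board rows cols a n b) :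
    ∀ s t : Nat, n = s + t → ∃ c, RF board rows cols a s c ∧ RF board rows cols c t b := by
  induction h with
  | refl =>
    intro s t hst
    have hs : s = 0 := by omega
    have ht : t = 0 := by omega
    subst hs; subst ht
    exact ⟨a, RF.refl, RF.refl⟩
  | @step u r c ch m h hm hb ih =>
    intro s t hst
    cases t with
    | zero =>
      refine ⟨_, ?_, RF.refl⟩
      have hs : s = u + 1 := by omega
      subst hs
      exact RF.step m h hm hb
    | succ t' =>
      obtain ⟨w, hw1, hw2⟩ := ih s t' (by omega)
      exact ⟨w, hw1, RF.step m hw2 hm hb⟩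

theorem Rch_zero_inv {board : List String} {rows cols : Int} {k : (Int × Int) × Int}
    (h : Rch board rows cols 0 k) : k = ((0, 0), 0) := by
  cases h
  rfl

theorem Rch_succ_inv {board : List String} {rows cols : Int} {s : Nat} {k' : (Int × Int) × Int}
    (h : Rch board rows cols (s + 1) k') :
    ∃ k, Rch board rows cols s k ∧ EdgeR board rows cols k k' := by
  cases h with
  | step m h hm hb => exact ⟨_, h, ⟨m, hm, hb, rfl⟩⟩

-- if no state is first reached at level σ, everything reachable was reached before σ
theorem reach_below {board : List String} {rows cols : Int} {σ : Nat}
    (h0 : ∀ k, ¬ dAt board rows cols σ k) :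
    ∀ t k, Rch board rows cols t k → ∃ t' < σ, Rch board rows cols t' k := by
  intro t
  induction t using Nat.strong_induction_on with
  | _ t ih =>
    intro k h
    by_cases hlt : t < σ
    · exact ⟨t, hlt, h⟩
    · have hge : σ ≤ t := by omega
      obtain ⟨c, hc1, hc2⟩ := RF_split h σ (t - σ) (by omega)
      have hnd := h0 c
      unfold dAt at hnd
      push_neg at hnd
      obtain ⟨u, hu, hru⟩ := hnd hc1
      exact ih (u + (t - σ)) (by omega) k (RF_trans hru hc2)

theorem frontier_succ {board : List String} {rows cols : Int} {σ : Nat}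
    {F V : List ((Int × Int) × Int)}
    (hF : ∀ k, k ∈ F ↔ dAt board rows cols σ k)
    (hV : ∀ k, k ∈ V ↔ ∃ t ≤ σ, Rch board rows cols t k)
    (k' : (Int × Int) × Int) :
    (k' ∉ V ∧ ∃ k ∈ F, EdgeR board rows cols k k') ↔ dAt board rows cols (σ + 1) k' := by
  constructor
  · rintro ⟨hnv, k, hkF, he⟩
    refine ⟨edge_step ((hF k).mp hkF).1 he, ?_⟩
    intro t ht hr
    exact hnv ((hV k').mpr ⟨t, by omega, hr⟩)
  · rintro ⟨hr, hmin⟩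
    obtain ⟨k, hprev, hedge⟩ := Rch_succ_inv hr
    refine ⟨?_, k, (hF k).mpr ⟨hprev, ?_⟩, hedge⟩
    · intro hv
      obtain ⟨t, ht, hrt⟩ := (hV k').mp hv
      exact hmin t (by omega) hrt
    · intro t ht hrt
      exact hmin (t + 1) (by omega) (edge_step hrt hedge)

theorem isbest_unique {board : List String} {rows cols : Int} {end_ : List Int} {md : Int}
    {σ : Nat} {b1 b2 : Int}
    (h1 : IsBest board rows cols end_ md σ b1) (h2 : IsBest board rows cols end_ md σ b2) :
    b1 = b2 := by
  obtain ⟨hw1, hm1, hmin1⟩ := h1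
  obtain ⟨hw2, hm2, hmin2⟩ := h2
  have hle : b1 ≤ b2 := by
    rcases hw2 with rfl | ⟨t, ht, k, hr, hh, hk⟩
    · exact hm1
    · rw [← hk]; exact hmin1 t ht k hr hh
  have hge : b2 ≤ b1 := by
    rcases hw1 with rfl | ⟨t, ht, k, hr, hh, hk⟩
    · exact hm2
    · rw [← hk]; exact hmin2 t ht k hr hh
  omega

theorem isbest_extend {board : List String} {rows cols : Int} {end_ : List Int} {md : Int}
    {σ σ' : Nat} {b : Int}
    (h0 : ∀ k, ¬ dAt board rows cols σ k) (hσ : σ ≤ σ')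
    (h : IsBest board rows cols end_ md σ b) :
    IsBest board rows cols end_ md σ' b := by
  obtain ⟨hw, hm, hmin⟩ := h
  refine ⟨?_, hm, ?_⟩
  · rcases hw with rfl | ⟨t, ht, k, hr, hh, hk⟩
    · exact Or.inl rfl
    · exact Or.inr ⟨t, by omega, k, hr, hh, hk⟩
  · intro t ht k hr hh
    obtain ⟨t', ht', hr'⟩ := reach_below h0 t k hr
    exact hmin t' ht' k hr' hh

-- the best-accumulator update, shared (syntactically) by both loops
def bupd (end_ : List Int) (b : Int) (it : (Int × Int) × Int) : Int :=
  if pairEqList it.1.1 it.1.2 end_ then min it.2 b else b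

theorem bupd_fold_le (end_ : List Int) : ∀ (L : List ((Int × Int) × Int)) (b : Int),
    L.foldl (bupd end_) b ≤ b := by
  intro L
  induction L with
  | nil => intro b; simp
  | cons it L ih =>
    intro b
    have h1 : bupd end_ b it ≤ b := by
      unfold bupd; split
      · exact min_le_right _ _
      · exact le_refl b
    calc (it :: L).foldl (bupd end_) b = L.foldl (bupd end_) (bupd end_ b it) := rfl
      _ ≤ bupd end_ b it := ih _
      _ ≤ b := h1

theorem bupd_fold_le_mem (end_ : List Int) : ∀ (L : List ((Int × Int) × Int)) (b : Int)
    (k : (Int × Int) × Int), k ∈ L → hitE end_ k → L.foldl (bupd end_) b ≤ k.2 := by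
  intro L
  induction L with
  | nil => intro b k hk; simp at hk
  | cons it L ih =>
    intro b k hk hh
    rcases List.mem_cons.mp hk with rfl | hk'
    · calc (k :: L).foldl (bupd end_) b = L.foldl (bupd end_) (bupd end_ b k) := rfl
        _ ≤ bupd end_ b k := bupd_fold_le end_ L _
        _ ≤ k.2 := by
          have hh' : pairEqList k.1.1 k.1.2 end_ = true := hh
          unfold bupd; rw [if_pos hh']; exact min_le_left _ _
    · exact ih _ k hk' hh

theorem bupd_fold_cases (end_ : List Int) : ∀ (L : List ((Int × Int) × Int)) (b : Int),
    L.foldl (bupd end_) b = b ∨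
      ∃ k ∈ L, hitE end_ k ∧ L.foldl (bupd end_) b = k.2 := by
  intro L
  induction L with
  | nil => intro b; exact Or.inl rfl
  | cons it L ih =>
    intro b
    have hstep : bupd end_ b it = b ∨ (hitE end_ it ∧ bupd end_ b it = it.2) := by
      unfold bupd hitE
      split
      · next h =>
        rcases min_cases it.2 b with ⟨he, _⟩ | ⟨he, _⟩
        · exact Or.inr ⟨h, he⟩
        · exact Or.inl he
      · exact Or.inl rfl
    rcases ih (bupd end_ b it) with he | ⟨k, hk, hh, he⟩
    · rcases hstep with h' | ⟨hh, h'⟩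
      · exact Or.inl (by rw [List.foldl_cons, he, h'])
      · exact Or.inr ⟨it, by simp, hh, by rw [List.foldl_cons, he, h']⟩
    · exact Or.inr ⟨k, by simp [hk], hh, by rw [List.foldl_cons, he]⟩

-- folding the best update over a list of level-σ representatives advances IsBest one level
theorem isbest_step {board : List String} {rows cols : Int} {end_ : List Int} {md : Int}
    {σ : Nat} {b : Int} {L : List ((Int × Int) × Int)}
    (hIB : IsBest board rows cols end_ md σ b)
    (hsound : ∀ k ∈ L, Rch board rows cols σ k)
    (hdom : ∀ k, Rch board rows cols σ k → hitE end_ k →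
      (∃ k' ∈ L, hitE end_ k' ∧ k'.2 ≤ k.2) ∨ (∃ t < σ, Rch board rows cols t k)) :
    IsBest board rows cols end_ md (σ + 1) (L.foldl (bupd end_) b) := by
  obtain ⟨hw, hm, hmin⟩ := hIB
  have hle := bupd_fold_le end_ L b
  refine ⟨?_, by omega, ?_⟩
  · rcases bupd_fold_cases end_ L b with he | ⟨k, hk, hh, he⟩
    · rw [he]
      rcases hw with rfl | ⟨t, ht, k, hr, hh, hk⟩
      · exact Or.inl rfl
      · exact Or.inr ⟨t, by omega, k, hr, hh, hk⟩
    · exact Or.inr ⟨σ, by omega, k, hsound k hk, hh, he.symm⟩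
  · intro t ht k hr hh
    by_cases htσ : t < σ
    · calc L.foldl (bupd end_) b ≤ b := hle
        _ ≤ k.2 := hmin t htσ k hr hh
    · have htσ' : t = σ := by omega
      subst htσ'
      rcases hdom k hr hh with ⟨k', hk', hh', hle'⟩ | ⟨t', ht', hr'⟩
      · calc L.foldl (bupd end_) b ≤ k'.2 := bupd_fold_le_mem end_ L b k' hk' hh'
          _ ≤ k.2 := hle'
      · calc L.foldl (bupd end_) b ≤ b := hle
          _ ≤ k.2 := hmin t' ht' k hr' hh

-- ----- the level-synchronous BFS computes IsBest -----

def nvstep (board : List String) (rows cols : Int)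
    (p : List ((Int × Int) × Int) × PySem.Set ((Int × Int) × Int)) (it : (Int × Int) × Int) :
    List ((Int × Int) × Int) × PySem.Set ((Int × Int) × Int) :=
  movesItems.foldl (bstep board rows cols it.1.1 it.1.2 it.2) p

theorem bitem_foldl_split (board : List String) (end_ : List Int) (rows cols : Int) :
    ∀ (L : List ((Int × Int) × Int)) (nx : List ((Int × Int) × Int))
      (vis : PySem.Set ((Int × Int) × Int)) (b : Int),
    L.foldl (bitem board end_ rows cols) (nx, vis, b)
      = ((L.foldl (nvstep board rows cols) (nx, vis)).1,
         (L.foldl (nvstep board rows cols) (nx, vis)).2,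
         L.foldl (bupd end_) b) := by
  intro L
  induction L with
  | nil => intro nx vis b; rfl
  | cons it L ih =>
    intro nx vis b
    have h1 : bitem board end_ rows cols (nx, vis, b) it
        = ((nvstep board rows cols (nx, vis) it).1, (nvstep board rows cols (nx, vis) it).2,
           bupd end_ b it) := by
      simp [bitem, nvstep, bupd]
    simp only [List.foldl_cons, h1]
    rw [ih]

theorem bstep_fold_shape (board : List String) (rows cols r c ch : Int)
    (V : List ((Int × Int) × Int)) :
    ∀ (ms : List (Char × Int × Int)) (nx : List ((Int × Int) × Int)),
    ∃ nx', ms.foldl (bstep board rows cols r c ch) (nx, V ++ nx) = (nx', V ++ nx') ∧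
      (∀ k', k' ∈ nx' ↔ k' ∈ nx ∨ (k' ∉ V ∧ ∃ m ∈ ms,
        (0 ≤ r + m.2.1 ∧ r + m.2.1 < rows ∧ 0 ≤ c + m.2.2 ∧ c + m.2.2 < cols) ∧
        k' = ((r + m.2.1, c + m.2.2), ch + (if charAt board r c ≠ m.1 then 1 else 0)))) := by
  intro ms
  induction ms with
  | nil => intro nx; exact ⟨nx, rfl, by simp⟩
  | cons m ms ih =>
    intro nx
    by_cases hb : 0 ≤ r + m.2.1 ∧ r + m.2.1 < rows ∧ 0 ≤ c + m.2.2 ∧ c + m.2.2 < cols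
    · set k0 : (Int × Int) × Int :=
        ((r + m.2.1, c + m.2.2), ch + (if charAt board r c ≠ m.1 then 1 else 0)) with hk0
      by_cases hmem : k0 ∈ V ++ nx
      · have hcont : PySem.Set.contains (V ++ nx) k0 = true := by
          rw [PySem.Set.contains_iff]; exact hmem
        have hstep : bstep board rows cols r c ch (nx, V ++ nx) m = (nx, V ++ nx) := by
          simp only [bstep]
          rw [if_pos hb, ← hk0, hcont]
          simp
        obtain ⟨nx', heq, hiff⟩ := ih nx
        refine ⟨nx', by rw [List.foldl_cons, hstep, heq], ?_⟩
        intro k'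
        rw [hiff k']
        constructor
        · rintro (h | ⟨hnv, mm, hmm, hbb, hk'⟩)
          · exact Or.inl h
          · exact Or.inr ⟨hnv, mm, List.mem_cons_of_mem _ hmm, hbb, hk'⟩
        · rintro (h | ⟨hnv, mm, hmm, hbb, hk'⟩)
          · exact Or.inl h
          · rcases List.mem_cons.mp hmm with rfl | hmm'
            · -- k' = k0 case: k0 ∈ V ++ nx and k' ∉ V forces k' ∈ nx
              have : k' = k0 := hk'
              rcases List.mem_append.mp (this ▸ hmem) with hv | hn
              · exact absurd hv hnv
              · exact Or.inl hn
            · exact Or.inr ⟨hnv, mm, hmm', hbb, hk'⟩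
      · have hcont : PySem.Set.contains (V ++ nx) k0 = false := by
          cases hC : PySem.Set.contains (V ++ nx) k0
          · rfl
          · exact absurd ((PySem.Set.contains_iff _ _).mp hC) hmem
        have hstep : bstep board rows cols r c ch (nx, V ++ nx) m
            = (nx ++ [k0], V ++ (nx ++ [k0])) := by
          simp only [bstep]
          rw [if_pos hb, ← hk0, hcont]
          simp [PySem.Set.add_of_not_mem hmem, List.append_assoc]
        obtain ⟨nx', heq, hiff⟩ := ih (nx ++ [k0])
        refine ⟨nx', by rw [List.foldl_cons, hstep, heq], ?_⟩
        intro k'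
        rw [hiff k']
        have hk0nv : k0 ∉ V := fun h => hmem (List.mem_append.mpr (Or.inl h))
        constructor
        · rintro (h | ⟨hnv, mm, hmm, hbb, hk'⟩)
          · rcases List.mem_append.mp h with hn | hs
            · exact Or.inl hn
            · have : k' = k0 := by simpa using hs
              subst this
              exact Or.inr ⟨hk0nv, m, by simp, hb, hk0⟩
          · exact Or.inr ⟨hnv, mm, List.mem_cons_of_mem _ hmm, hbb, hk'⟩
        · rintro (h | ⟨hnv, mm, hmm, hbb, hk'⟩)
          · exact Or.inl (List.mem_append.mpr (Or.inl h))
          · rcases List.mem_cons.mp hmm with rfl | hmm'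
            · exact Or.inl (List.mem_append.mpr (Or.inr (by simp [hk', hk0])))
            · exact Or.inr ⟨hnv, mm, hmm', hbb, hk'⟩
    · have hstep : bstep board rows cols r c ch (nx, V ++ nx) m = (nx, V ++ nx) := by
        simp only [bstep]
        rw [if_neg hb]
      obtain ⟨nx', heq, hiff⟩ := ih nx
      refine ⟨nx', by rw [List.foldl_cons, hstep, heq], ?_⟩
      intro k'
      rw [hiff k']
      constructor
      · rintro (h | ⟨hnv, mm, hmm, hbb, hk'⟩)
        · exact Or.inl h
        · exact Or.inr ⟨hnv, mm, List.mem_cons_of_mem _ hmm, hbb, hk'⟩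
      · rintro (h | ⟨hnv, mm, hmm, hbb, hk'⟩)
        · exact Or.inl h
        · rcases List.mem_cons.mp hmm with rfl | hmm'
          · exact absurd hbb hb
          · exact Or.inr ⟨hnv, mm, hmm', hbb, hk'⟩

theorem nv_fold_shape (board : List String) (rows cols : Int) (V : List ((Int × Int) × Int)) :
    ∀ (L : List ((Int × Int) × Int)) (nx : List ((Int × Int) × Int)),
    ∃ nx', L.foldl (nvstep board rows cols) (nx, V ++ nx) = (nx', V ++ nx') ∧
      (∀ k', k' ∈ nx' ↔ k' ∈ nx ∨ (k' ∉ V ∧ ∃ k ∈ L, EdgeR board rows cols k k')) := by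
  intro L
  induction L with
  | nil => intro nx; exact ⟨nx, rfl, by simp⟩
  | cons it L ih =>
    intro nx
    obtain ⟨nx1, heq1, hiff1⟩ := bstep_fold_shape board rows cols it.1.1 it.1.2 it.2 V movesItems nx
    obtain ⟨nx', heq2, hiff2⟩ := ih nx1
    refine ⟨nx', ?_, ?_⟩
    · rw [List.foldl_cons]
      show L.foldl (nvstep board rows cols) (nvstep board rows cols (nx, V ++ nx) it) = _
      unfold nvstep
      rw [heq1]
      exact heq2
    · intro k'
      rw [hiff2 k']
      have hE : ∀ k', (∃ m ∈ movesItems,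
          (0 ≤ it.1.1 + m.2.1 ∧ it.1.1 + m.2.1 < rows ∧ 0 ≤ it.1.2 + m.2.2 ∧ it.1.2 + m.2.2 < cols) ∧
          k' = ((it.1.1 + m.2.1, it.1.2 + m.2.2), it.2 + (if charAt board it.1.1 it.1.2 ≠ m.1 then 1 else 0)))
          ↔ EdgeR board rows cols it k' := by
        intro k'; rfl
      constructor
      · rintro (h | ⟨hnv, k, hk, he⟩)
        · rcases (hiff1 k').mp h with h' | ⟨hnv, hm⟩
          · exact Or.inl h'
          · exact Or.inr ⟨hnv, it, by simp, (hE k').mp hm⟩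
        · exact Or.inr ⟨hnv, k, List.mem_cons_of_mem _ hk, he⟩
      · rintro (h | ⟨hnv, k, hk, he⟩)
        · exact Or.inl ((hiff1 k').mpr (Or.inl h))
        · rcases List.mem_cons.mp hk with rfl | hk'
          · exact Or.inl ((hiff1 k').mpr (Or.inr ⟨hnv, (hE k').mpr he⟩))
          · exact Or.inr ⟨hnv, k, hk', he⟩

theorem bloop_isbest (board : List String) (limit : Int) (end_ : List Int) (rows cols md : Int)
    (hlim : 0 ≤ limit) :
    ∀ (fuel : Nat) (F : List ((Int × Int) × Int)) (V : List ((Int × Int) × Int)) (σ : Nat) (b : Int),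
    (∀ k, k ∈ F ↔ dAt board rows cols σ k) →
    (∀ k, k ∈ V ↔ ∃ t ≤ σ, Rch board rows cols t k) →
    IsBest board rows cols end_ md σ b →
    ((σ : Int) ≤ limit + 1) → (limit + 2 ≤ (fuel : Int) + σ) →
    IsBest board rows cols end_ md (limit.toNat + 1)
      (bloop board limit end_ rows cols fuel F V (σ : Int) b) := by
  intro fuel
  induction fuel with
  | zero =>
    intro F V σ b hF hV hIB hσ hfuel
    exact absurd hfuel (by push_cast; omega)
  | succ fuel ih =>
    intro F V σ b hF hV hIB hσ hfuel
    by_cases hg : F = [] ∨ (σ : Int) > limit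
    · have hret : bloop board limit end_ rows cols (fuel + 1) F V (σ : Int) b = b := by
        simp only [bloop]
        rw [if_pos hg]
      rw [hret]
      rcases hg with hFe | hgt
      · have h0 : ∀ k, ¬ dAt board rows cols σ k := by
          intro k hk
          have := (hF k).mpr hk
          simp [hFe] at this
        exact isbest_extend h0 (by omega) hIB
      · have hσe : σ = limit.toNat + 1 := by omega
        rw [← hσe]
        exact hIB
    · push_neg at hg
      obtain ⟨hFne, hle⟩ := hg
      have hgf : ¬ (F = [] ∨ (σ : Int) > limit) := by
        push_neg
        exact ⟨hFne, hle⟩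
      have hstep : bloop board limit end_ rows cols (fuel + 1) F V (σ : Int) b
          = (let t := F.foldl (bitem board end_ rows cols) ([], V, b);
             bloop board limit end_ rows cols fuel t.1 t.2.1 ((σ : Int) + 1) t.2.2) := by
        simp only [bloop]
        rw [if_neg hgf]
      rw [hstep]
      rw [bitem_foldl_split]
      obtain ⟨F', heq, hiff⟩ := nv_fold_shape board rows cols V F ([])
      rw [List.append_nil] at heq
      have hF' : ∀ k', k' ∈ F' ↔ dAt board rows cols (σ + 1) k' := by
        intro k'
        rw [← frontier_succ hF hV k']
        have := hiff k'
        simp only [List.not_mem_nil, false_or] at this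
        exact this
      have hV' : ∀ k, k ∈ V ++ F' ↔ ∃ t ≤ σ + 1, Rch board rows cols t k := by
        intro k
        rw [List.mem_append, hV k, hF' k]
        constructor
        · rintro (⟨t, ht, hr⟩ | ⟨hr, _⟩)
          · exact ⟨t, by omega, hr⟩
          · exact ⟨σ + 1, le_refl _, hr⟩
        · rintro ⟨t, ht, hr⟩
          by_cases htσ : t ≤ σ
          · exact Or.inl ⟨t, htσ, hr⟩
          · have : t = σ + 1 := by omega
            subst this
            by_cases hearly : ∃ t' ≤ σ, Rch board rows cols t' k
            · exact Or.inl hearly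
            · refine Or.inr ⟨hr, ?_⟩
              intro t' ht' hr'
              exact hearly ⟨t', by omega, hr'⟩
      have hIB' : IsBest board rows cols end_ md (σ + 1) (F.foldl (bupd end_) b) := by
        refine isbest_step hIB ?_ ?_
        · intro k hk
          exact ((hF k).mp hk).1
        · intro k hr hh
          by_cases hearly : ∃ t < σ, Rch board rows cols t k
          · exact Or.inr hearly
          · refine Or.inl ⟨k, (hF k).mpr ⟨hr, ?_⟩, hh, le_refl _⟩
            intro t ht hr'
            exact hearly ⟨t, ht, hr'⟩
      have hcast : ((σ : Int) + 1) = (((σ + 1 : Nat)) : Int) := by push_cast; ring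
      rw [heq]
      simp only []
      rw [hcast]
      exact ih F' (V ++ F') (σ + 1) (F.foldl (bupd end_) b) hF' hV' hIB'
        (by push_cast; omega) (by push_cast at hfuel ⊢; omega)

-- ----- the DP loop computes IsBest -----

-- "d maps each cell to the least P-candidate for it, and has no key where none exists"
def DI (P : (Int × Int) → Int → Prop) (d : PySem.Dict (Int × Int) Int) : Prop :=
  ∀ cell, (∀ v, d.get? cell = some v → (P cell v ∧ ∀ w, P cell w → v ≤ w)) ∧
    (d.get? cell = none → ∀ w, ¬ P cell w)

theorem DI_cong {P Q : (Int × Int) → Int → Prop} {d : PySem.Dict (Int × Int) Int}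
    (h : DI P d) (hpq : ∀ cell v, P cell v ↔ Q cell v) : DI Q d := by
  intro cell
  obtain ⟨h1, h2⟩ := h cell
  constructor
  · intro v hv
    obtain ⟨hp, hmin⟩ := h1 v hv
    exact ⟨(hpq cell v).mp hp, fun w hw => hmin w ((hpq cell w).mpr hw)⟩
  · intro hn w hw
    exact h2 hn w ((hpq cell w).mpr hw)

def relax (d : PySem.Dict (Int × Int) Int) (cell0 : Int × Int) (w0 : Int) :
    PySem.Dict (Int × Int) Int :=
  match d.get? cell0 with
  | none => d.insert cell0 w0
  | some old => if w0 < old then d.insert cell0 w0 else d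

theorem DI_insert {P : (Int × Int) → Int → Prop} {d : PySem.Dict (Int × Int) Int}
    (hI : DI P d) (cell0 : Int × Int) (w0 : Int) (hno : ∀ w, P cell0 w → w0 ≤ w) :
    DI (fun cell v => P cell v ∨ (cell = cell0 ∧ v = w0)) (d.insert cell0 w0) := by
  intro cell
  by_cases hc : cell = cell0
  · subst hc
    constructor
    · intro v hv
      rw [PySem.Dict.get?_insert_self] at hv
      injection hv with h
      subst h
      refine ⟨Or.inr ⟨rfl, rfl⟩, ?_⟩
      rintro w (hw | ⟨_, rfl⟩)
      · exact hno w hw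
      · exact le_refl _
    · intro hn
      rw [PySem.Dict.get?_insert_self] at hn
      cases hn
  · constructor
    · intro v hv
      rw [PySem.Dict.get?_insert_of_ne _ _ hc] at hv
      obtain ⟨hp, hmin⟩ := (hI cell).1 v hv
      refine ⟨Or.inl hp, ?_⟩
      rintro w (hw | ⟨hcc, _⟩)
      · exact hmin w hw
      · exact absurd hcc hc
    · intro hn w hw
      rw [PySem.Dict.get?_insert_of_ne _ _ hc] at hn
      rcases hw with hw | ⟨hcc, _⟩
      · exact (hI cell).2 hn w hw
      · exact hc hcc

theorem DI_relax {P : (Int × Int) → Int → Prop} {d : PySem.Dict (Int × Int) Int}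
    (hI : DI P d) (cell0 : Int × Int) (w0 : Int) :
    DI (fun cell v => P cell v ∨ (cell = cell0 ∧ v = w0)) (relax d cell0 w0) := by
  unfold relax
  cases hd : d.get? cell0 with
  | none =>
    exact DI_insert hI cell0 w0 (fun w hw => absurd hw ((hI cell0).2 hd w))
  | some old =>
    show DI (fun cell v => P cell v ∨ (cell = cell0 ∧ v = w0)) (if w0 < old then d.insert cell0 w0 else d)
    by_cases hlt : w0 < old
    · rw [if_pos hlt]
      refine DI_insert hI cell0 w0 (fun w hw => ?_)
      have := ((hI cell0).1 old hd).2 w hw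
      omega
    · rw [if_neg hlt]
      intro cell
      by_cases hc : cell = cell0
      · subst hc
        constructor
        · intro v hv
          rw [hd] at hv
          injection hv with h
          subst h
          obtain ⟨hp, hmin⟩ := (hI cell).1 old hd
          refine ⟨Or.inl hp, ?_⟩
          rintro w (hw | ⟨_, rfl⟩)
          · exact hmin w hw
          · omega
        · intro hn
          rw [hd] at hn
          cases hn
      · constructor
        · intro v hv
          obtain ⟨hp, hmin⟩ := (hI cell).1 v hv
          refine ⟨Or.inl hp, ?_⟩
          rintro w (hw | ⟨hcc, _⟩)
          · exact hmin w hw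
          · exact absurd hcc hc
        · intro hn w hw
          rcases hw with hw | ⟨hcc, _⟩
          · exact (hI cell).2 hn w hw
          · exact hc hcc

theorem dstep_eq (board : List String) (rows cols r c ch : Int)
    (ndp : PySem.Dict (Int × Int) Int) (m : Char × Int × Int) :
    dstep board rows cols r c ch ndp m
      = if 0 ≤ r + m.2.1 ∧ r + m.2.1 < rows ∧ 0 ≤ c + m.2.2 ∧ c + m.2.2 < cols
        then relax ndp (r + m.2.1, c + m.2.2) (ch + (if charAt board r c ≠ m.1 then 1 else 0))
        else ndp := rfl

-- candidates contributed by the moves in ms from source state ((r, c), ch)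
def CandM (board : List String) (rows cols r c ch : Int) (ms : List (Char × Int × Int))
    (cell : Int × Int) (v : Int) : Prop :=
  ∃ m ∈ ms, (0 ≤ r + m.2.1 ∧ r + m.2.1 < rows ∧ 0 ≤ c + m.2.2 ∧ c + m.2.2 < cols) ∧
    cell = (r + m.2.1, c + m.2.2) ∧ v = ch + (if charAt board r c ≠ m.1 then 1 else 0)

theorem DI_dstep_fold (board : List String) (rows cols r c ch : Int) :
    ∀ (ms : List (Char × Int × Int)) (P : (Int × Int) → Int → Prop) (ndp : PySem.Dict (Int × Int) Int),
    DI P ndp →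
    DI (fun cell v => P cell v ∨ CandM board rows cols r c ch ms cell v)
      (ms.foldl (dstep board rows cols r c ch) ndp) := by
  intro ms
  induction ms with
  | nil =>
    intro P ndp hI
    refine DI_cong hI ?_
    intro cell v
    simp [CandM]
  | cons m ms ih =>
    intro P ndp hI
    rw [List.foldl_cons]
    by_cases hb : 0 ≤ r + m.2.1 ∧ r + m.2.1 < rows ∧ 0 ≤ c + m.2.2 ∧ c + m.2.2 < cols
    · have hstep : dstep board rows cols r c ch ndp m
          = relax ndp (r + m.2.1, c + m.2.2) (ch + (if charAt board r c ≠ m.1 then 1 else 0)) := by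
        rw [dstep_eq, if_pos hb]
      rw [hstep]
      have h1 := DI_relax hI (r + m.2.1, c + m.2.2) (ch + (if charAt board r c ≠ m.1 then 1 else 0))
      have h2 := ih _ _ h1
      refine DI_cong h2 ?_
      intro cell v
      unfold CandM
      constructor
      · rintro ((hp | ⟨hc, hv⟩) | ⟨mm, hmm, hbb, hcc, hvv⟩)
        · exact Or.inl hp
        · exact Or.inr ⟨m, by simp, hb, hc, hv⟩
        · exact Or.inr ⟨mm, List.mem_cons_of_mem _ hmm, hbb, hcc, hvv⟩
      · rintro (hp | ⟨mm, hmm, hbb, hcc, hvv⟩)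
        · exact Or.inl (Or.inl hp)
        · rcases List.mem_cons.mp hmm with rfl | hmm'
          · exact Or.inl (Or.inr ⟨hcc, hvv⟩)
          · exact Or.inr ⟨mm, hmm', hbb, hcc, hvv⟩
    · have hstep : dstep board rows cols r c ch ndp m = ndp := by
        rw [dstep_eq, if_neg hb]
      rw [hstep]
      have h2 := ih P ndp hI
      refine DI_cong h2 ?_
      intro cell v
      unfold CandM
      constructor
      · rintro (hp | ⟨mm, hmm, hbb, hcc, hvv⟩)
        · exact Or.inl hp
        · exact Or.inr ⟨mm, List.mem_cons_of_mem _ hmm, hbb, hcc, hvv⟩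
      · rintro (hp | ⟨mm, hmm, hbb, hcc, hvv⟩)
        · exact Or.inl hp
        · rcases List.mem_cons.mp hmm with rfl | hmm'
          · exact absurd hbb hb
          · exact Or.inr ⟨mm, hmm', hbb, hcc, hvv⟩

-- candidates contributed by all items of L
def CandL (board : List String) (rows cols : Int) (L : List ((Int × Int) × Int))
    (cell : Int × Int) (v : Int) : Prop :=
  ∃ it ∈ L, CandM board rows cols it.1.1 it.1.2 it.2 movesItems cell v

theorem DI_nd_fold (board : List String) (rows cols : Int) :
    ∀ (L : List ((Int × Int) × Int)) (P : (Int × Int) → Int → Prop) (ndp : PySem.Dict (Int × Int) Int),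
    DI P ndp →
    DI (fun cell v => P cell v ∨ CandL board rows cols L cell v)
      (L.foldl (fun nd it => movesItems.foldl (dstep board rows cols it.1.1 it.1.2 it.2) nd) ndp) := by
  intro L
  induction L with
  | nil =>
    intro P ndp hI
    refine DI_cong hI ?_
    intro cell v
    simp [CandL]
  | cons it L ih =>
    intro P ndp hI
    rw [List.foldl_cons]
    have h1 := DI_dstep_fold board rows cols it.1.1 it.1.2 it.2 movesItems P ndp hI
    have h2 := ih _ _ h1
    refine DI_cong h2 ?_
    intro cell v
    unfold CandL
    constructor
    · rintro ((hp | hc) | ⟨jt, hjt, hcm⟩)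
      · exact Or.inl hp
      · exact Or.inr ⟨it, by simp, hc⟩
      · exact Or.inr ⟨jt, List.mem_cons_of_mem _ hjt, hcm⟩
    · rintro (hp | ⟨jt, hjt, hcm⟩)
      · exact Or.inl (Or.inl hp)
      · rcases List.mem_cons.mp hjt with rfl | hjt'
        · exact Or.inl (Or.inr hcm)
        · exact Or.inr ⟨jt, hjt', hcm⟩

theorem nodup_keys_relax (d : PySem.Dict (Int × Int) Int) (cell0 : Int × Int) (w0 : Int)
    (h : d.keys.Nodup) : (relax d cell0 w0).keys.Nodup := by
  unfold relax
  cases hd : d.get? cell0 with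
  | none => exact PySem.Dict.nodup_keys_insert _ _ _ h
  | some old =>
    show (if w0 < old then d.insert cell0 w0 else d).keys.Nodup
    split
    · exact PySem.Dict.nodup_keys_insert _ _ _ h
    · exact h

theorem nodup_keys_dstep (board : List String) (rows cols r c ch : Int)
    (ndp : PySem.Dict (Int × Int) Int) (m : Char × Int × Int)
    (h : ndp.keys.Nodup) : (dstep board rows cols r c ch ndp m).keys.Nodup := by
  rw [dstep_eq]
  split
  · exact nodup_keys_relax _ _ _ h
  · exact h

theorem nodup_keys_dstep_fold (board : List String) (rows cols r c ch : Int) :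
    ∀ (ms : List (Char × Int × Int)) (ndp : PySem.Dict (Int × Int) Int),
    ndp.keys.Nodup → (ms.foldl (dstep board rows cols r c ch) ndp).keys.Nodup := by
  intro ms
  induction ms with
  | nil => intro ndp h; exact h
  | cons m ms ih =>
    intro ndp h
    exact ih _ (nodup_keys_dstep board rows cols r c ch ndp m h)

theorem nodup_keys_nd_fold (board : List String) (rows cols : Int) :
    ∀ (L : List ((Int × Int) × Int)) (ndp : PySem.Dict (Int × Int) Int),
    ndp.keys.Nodup →
    (L.foldl (fun nd it => movesItems.foldl (dstep board rows cols it.1.1 it.1.2 it.2) nd) ndp).keys.Nodup := by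
  intro L
  induction L with
  | nil => intro ndp h; exact h
  | cons it L ih =>
    intro ndp h
    exact ih _ (nodup_keys_dstep_fold board rows cols it.1.1 it.1.2 it.2 movesItems ndp h)

-- dp invariant: d stores, per cell, the least change count among level-σ walks to it
def DInv (board : List String) (rows cols : Int) (σ : Nat) (d : PySem.Dict (Int × Int) Int) : Prop :=
  (∀ cell v, d.get? cell = some v →
    (Rch board rows cols σ (cell, v) ∧ ∀ ch, Rch board rows cols σ (cell, ch) → v ≤ ch)) ∧
  (∀ cell ch, Rch board rows cols σ (cell, ch) → d.get? cell ≠ none)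

theorem ditem_foldl_split (board : List String) (end_ : List Int) (rows cols : Int) :
    ∀ (L : List ((Int × Int) × Int)) (d : PySem.Dict (Int × Int) Int) (b : Int),
    L.foldl (ditem board end_ rows cols) (d, b)
      = (L.foldl (fun nd it => movesItems.foldl (dstep board rows cols it.1.1 it.1.2 it.2) nd) d,
         L.foldl (bupd end_) b) := by
  intro L
  induction L with
  | nil => intro d b; rfl
  | cons it L ih =>
    intro d b
    have h1 : ditem board end_ rows cols (d, b) it
        = (movesItems.foldl (dstep board rows cols it.1.1 it.1.2 it.2) d, bupd end_ b it) := by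
      simp [ditem, bupd]
    simp only [List.foldl_cons, h1]
    rw [ih]

theorem DInv_step (board : List String) (rows cols : Int) (σ : Nat)
    (d : PySem.Dict (Int × Int) Int) (hI : DInv board rows cols σ d) (hnd : d.keys.Nodup) :
    DInv board rows cols (σ + 1)
      (d.items.foldl (fun nd it => movesItems.foldl (dstep board rows cols it.1.1 it.1.2 it.2) nd)
        PySem.Dict.empty) := by
  have hemp : DI (fun _ _ => False) (PySem.Dict.empty : PySem.Dict (Int × Int) Int) := by
    intro cell
    constructor
    · intro v hv
      rw [PySem.Dict.get?_empty] at hv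
      cases hv
    · intro _ w hw
      exact hw
  have hDI := DI_nd_fold board rows cols d.items _ _ hemp
  have hDI' : DI (CandL board rows cols d.items)
      (d.items.foldl (fun nd it => movesItems.foldl (dstep board rows cols it.1.1 it.1.2 it.2) nd)
        PySem.Dict.empty) := by
    refine DI_cong hDI ?_
    intro cell v
    simp
  -- every candidate is reached at level σ+1
  have hcand_sound : ∀ cell v, CandL board rows cols d.items cell v →
      Rch board rows cols (σ + 1) (cell, v) := by
    rintro cell v ⟨it, hit, m, hm, hb, hcc, hvv⟩
    have hget : d.get? it.1 = some it.2 := PySem.Dict.get?_of_mem_items _ (by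
      obtain ⟨a, b2⟩ := it
      exact hit) hnd
    have hr : Rch board rows cols σ (it.1, it.2) := (hI.1 it.1 it.2 hget).1
    have hr' : Rch board rows cols σ ((it.1.1, it.1.2), it.2) := by
      obtain ⟨⟨a, b2⟩, c2⟩ := it
      exact hr
    rw [hcc, hvv]
    exact RF.step m hr' hm hb
  -- every level-(σ+1) value is dominated by a candidate
  have hcand_dom : ∀ cell ch, Rch board rows cols (σ + 1) (cell, ch) →
      ∃ w, CandL board rows cols d.items cell w ∧ w ≤ ch := by
    intro cell ch hr
    obtain ⟨k, hprev, m, hm, hb, hk'⟩ := Rch_succ_inv hr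
    obtain ⟨⟨r, c⟩, ch0⟩ := k
    rcases hget : d.get? (r, c) with _ | v
    · exact absurd hget (hI.2 (r, c) ch0 hprev)
    · have hmin := (hI.1 (r, c) v hget).2 ch0 hprev
      have hmem : ((r, c), v) ∈ d.items := PySem.Dict.mem_items_of_get?_eq_some _ hget
      have hcell : cell = (r + m.2.1, c + m.2.2) := by
        have := congrArg Prod.fst hk'
        simpa using this
      have hch : ch = ch0 + (if charAt board r c ≠ m.1 then 1 else 0) := by
        have := congrArg Prod.snd hk'
        simpa using this
      refine ⟨v + (if charAt board r c ≠ m.1 then 1 else 0),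
        ⟨((r, c), v), hmem, m, hm, hb, hcell, rfl⟩, by omega⟩
  constructor
  · intro cell v hv
    obtain ⟨hc, hmin⟩ := (hDI' cell).1 v hv
    refine ⟨hcand_sound cell v hc, ?_⟩
    intro ch hr
    obtain ⟨w, hw, hwle⟩ := hcand_dom cell ch hr
    have := hmin w hw
    omega
  · intro cell ch hr hn
    obtain ⟨w, hw, _⟩ := hcand_dom cell ch hr
    exact (hDI' cell).2 hn w hw

theorem dloop_isbest (board : List String) (limit : Int) (end_ : List Int) (rows cols md : Int)
    (hlim : 0 ≤ limit) :
    ∀ (fuel : Nat) (d : PySem.Dict (Int × Int) Int) (σ : Nat) (b : Int),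
    DInv board rows cols σ d → d.keys.Nodup →
    IsBest board rows cols end_ md σ b →
    ((σ : Int) ≤ limit + 1) → (limit + 2 ≤ (fuel : Int) + σ) →
    IsBest board rows cols end_ md (limit.toNat + 1)
      (dloop board limit end_ rows cols fuel d (σ : Int) b) := by
  intro fuel
  induction fuel with
  | zero =>
    intro d σ b hI hnd hIB hσ hfuel
    exact absurd hfuel (by push_cast; omega)
  | succ fuel ih =>
    intro d σ b hI hnd hIB hσ hfuel
    by_cases hg : d.items = [] ∨ (σ : Int) > limit
    · have hret : dloop board limit end_ rows cols (fuel + 1) d (σ : Int) b = b := by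
        simp only [dloop]
        rw [if_pos hg]
      rw [hret]
      rcases hg with hde | hgt
      · have hnone : ∀ cell, d.get? cell = none := by
          intro cell
          have hdempty : d = PySem.Dict.empty := PySem.Dict.ext (by
            rw [hde]
            rfl)
          rw [hdempty]
          exact PySem.Dict.get?_empty cell
        have h0 : ∀ k, ¬ dAt board rows cols σ k := by
          rintro ⟨cell, ch⟩ ⟨hr, _⟩
          exact hI.2 cell ch hr (hnone cell)
        exact isbest_extend h0 (by omega) hIB
      · have hσe : σ = limit.toNat + 1 := by omega
        rw [← hσe]
        exact hIB
    · push_neg at hg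
      have hgf : ¬ (d.items = [] ∨ (σ : Int) > limit) := by
        push_neg
        exact hg
      have hstep : dloop board limit end_ rows cols (fuel + 1) d (σ : Int) b
          = (let t := d.items.foldl (ditem board end_ rows cols) (PySem.Dict.empty, b);
             dloop board limit end_ rows cols fuel t.1 ((σ : Int) + 1) t.2) := by
        simp only [dloop]
        rw [if_neg hgf]
      rw [hstep]
      rw [ditem_foldl_split]
      have hI' := DInv_step board rows cols σ d hI hnd
      have hnd' := nodup_keys_nd_fold board rows cols d.items PySem.Dict.empty
        PySem.Dict.nodup_keys_empty
      have hIB' : IsBest board rows cols end_ md (σ + 1) (d.items.foldl (bupd end_) b) := by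
        refine isbest_step hIB ?_ ?_
        · intro k hk
          obtain ⟨cell, v⟩ := k
          have hget : d.get? cell = some v := PySem.Dict.get?_of_mem_items _ hk hnd
          exact (hI.1 cell v hget).1
        · intro k hr hh
          obtain ⟨cell, ch⟩ := k
          rcases hget : d.get? cell with _ | v
          · exact absurd hget (hI.2 cell ch hr)
          · refine Or.inl ⟨(cell, v), PySem.Dict.mem_items_of_get?_eq_some _ hget, hh, ?_⟩
            exact (hI.1 cell v hget).2 ch hr
      have hcast : ((σ : Int) + 1) = (((σ + 1 : Nat)) : Int) := by push_cast; ring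
      simp only []
      rw [hcast]
      exact ih _ (σ + 1) _ hI' hnd' hIB' (by push_cast; omega) (by push_cast at hfuel ⊢; omega)

-- ----- assembling: B equals the level BFS, hence equals A -----

theorem alt_eq_lbfs : ∀ (board : List String) (limit : Int) (end_ : List Int) (min_distance : Int),
    bfs_alt board limit end_ min_distance = lbfs board limit end_ min_distance := by
  intro board limit end_ md
  simp only [bfs_alt, lbfs]
  have hvis0 : PySem.Set.add PySem.Set.empty (((0 : Int), (0 : Int)), (0 : Int))
      = [((0, 0), 0)] := rfl
  rw [hvis0]
  set rows : Int := (board.length : Int)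
  set cols : Int := PySem.Str.len (PySem.List.pyGetD board 0 "")
  by_cases hl : 0 ≤ limit
  · have hF0 : ∀ k, k ∈ ([((0, 0), 0)] : List ((Int × Int) × Int)) ↔ dAt board rows cols 0 k := by
      intro k
      simp only [List.mem_singleton]
      constructor
      · rintro rfl
        exact ⟨RF.refl, by omega⟩
      · rintro ⟨hr, _⟩
        exact Rch_zero_inv hr
    have hV0 : ∀ k, k ∈ ([((0, 0), 0)] : List ((Int × Int) × Int)) ↔
        ∃ t ≤ 0, Rch board rows cols t k := by
      intro k
      simp only [List.mem_singleton]
      constructor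
      · rintro rfl
        exact ⟨0, le_refl _, RF.refl⟩
      · rintro ⟨t, ht, hr⟩
        have ht0 : t = 0 := by omega
        subst ht0
        exact Rch_zero_inv hr
    have hIB0 : IsBest board rows cols end_ md 0 md :=
      ⟨Or.inl rfl, le_refl _, by omega⟩
    have hD0 : DInv board rows cols 0 (PySem.Dict.empty.insert ((0 : Int), (0 : Int)) (0 : Int)) := by
      constructor
      · intro cell v hv
        rw [PySem.Dict.get?_insert] at hv
        split at hv
        · next hc =>
          have hv' : v = 0 := by injection hv with h; exact h.symm
          subst hv'
          subst hc
          refine ⟨RF.refl, ?_⟩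
          intro ch hr
          have := Rch_zero_inv hr
          have hch : ch = 0 := by
            have := congrArg Prod.snd this
            simpa using this
          omega
        · rw [PySem.Dict.get?_empty] at hv
          cases hv
      · intro cell ch hr
        have hk := Rch_zero_inv hr
        have hc : cell = (0, 0) := by
          have := congrArg Prod.fst hk
          simpa using this
        subst hc
        rw [PySem.Dict.get?_insert_self]
        simp
    have hnd0 : (PySem.Dict.empty.insert ((0 : Int), (0 : Int)) (0 : Int)).keys.Nodup :=
      PySem.Dict.nodup_keys_insert _ _ _ PySem.Dict.nodup_keys_empty
    have h1 := dloop_isbest board limit end_ rows cols md hl (limit.toNat + 2)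
      (PySem.Dict.empty.insert (0, 0) 0) 0 md hD0 hnd0 hIB0 (by push_cast; omega)
      (by push_cast; omega)
    have h2 := bloop_isbest board limit end_ rows cols md hl (limit.toNat + 2)
      [((0, 0), 0)] [((0, 0), 0)] 0 md hF0 hV0 hIB0 (by push_cast; omega)
      (by push_cast; omega)
    rw [show (((0 : Nat)) : Int) = (0 : Int) by norm_num] at h1 h2
    exact isbest_unique h1 h2
  · have e1 : dloop board limit end_ rows cols (limit.toNat + 2)
        (PySem.Dict.empty.insert (0, 0) 0) 0 md = md := by
      show dloop board limit end_ rows cols ((limit.toNat + 1) + 1) _ _ _ = md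
      simp only [dloop]
      rw [if_pos (Or.inr (by omega))]
    have e2 : bloop board limit end_ rows cols (limit.toNat + 2)
        [((0, 0), 0)] [((0, 0), 0)] 0 md = md := by
      show bloop board limit end_ rows cols ((limit.toNat + 1) + 1) _ _ _ _ = md
      simp only [bloop]
      rw [if_pos (Or.inr (by omega))]
    rw [e1, e2]

theorem bfs_equal_everywhere : ∀ (board : List String) (limit : Int) (end_ : List Int) (min_distance : Int),
    bfs board limit end_ min_distance = bfs_alt board limit end_ min_distance := by
  intro board limit end_ md
  rw [bfs_eq_lbfs, alt_eq_lbfs]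

-- ===== VERDICT (by name: the statement is the Claim_ definition above) =====
theorem bfs_spec : Claim_equal_bfs := by
  intro board limit end_ min_distance _ _
  unfold Spec_bfs
  exact bfs_equal_everywhere board limit end_ min_distance
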